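-- pv_equiv track=rewrite | github.com/pokes2013/git_code-learn | python/python项目/python核算考勤项目/升级优化1-豆包压缩行数.py | merge_morning_checkins
-- ===== SOURCE A (Python) =====
-- def merge_morning_checkins(attendance_row, start="06:00:00", end="08:00:00"):
--     name, date = attendance_row[:2]  # 提取姓名和日期
--     check_times = attendance_row[2:]  # 提取所有打卡时间
--     in_range = [t for t in check_times if start <= t < end]  # 筛选指定时段打卡
--     others = [t for t in check_times if not (start <= t < end)]  # 其他时段打卡
--     result = [name, date]  # 初始化结果列表
--     if in_range: result.append(min(in_range))  # 添加最早打卡(如有)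
--     result.extend(others)  # 添加其他时段打卡
--     return result
-- ===== SOURCE B (Python) =====
-- def merge_morning_checkins(attendance_row, start="06:00:00", end="08:00:00"):
--     name, date = attendance_row[:2]
--     check_times = attendance_row[2:]
--     # Sort-then-scan: the first sorted time >= start is the smallest time >= start;
--     # it is the earliest in-range check-in iff it is < end, and if it is >= end
--     # no in-range check-in exists at all.
--     earliest = None
--     for t in sorted(check_times):
--         if t >= start:
--             if t < end:
--                 earliest = t
--             break
--     result = [name, date]
--     if earliest is not None:
--         result.append(earliest)
--     result += [t for t in check_times if not (start <= t < end)]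
--     return result
-- ===== Notes on version B (the rewrite author's own statement) =====
-- stated objective: alternative
-- what changed: B replaces A's partition-into-two-lists-plus-min() strategy with a sort-then-scan: it sorts the check times, finds the first sorted time >= start (which is the earliest in-range time iff it is < end), and never materialises the in_range list.
import Mathlib
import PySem

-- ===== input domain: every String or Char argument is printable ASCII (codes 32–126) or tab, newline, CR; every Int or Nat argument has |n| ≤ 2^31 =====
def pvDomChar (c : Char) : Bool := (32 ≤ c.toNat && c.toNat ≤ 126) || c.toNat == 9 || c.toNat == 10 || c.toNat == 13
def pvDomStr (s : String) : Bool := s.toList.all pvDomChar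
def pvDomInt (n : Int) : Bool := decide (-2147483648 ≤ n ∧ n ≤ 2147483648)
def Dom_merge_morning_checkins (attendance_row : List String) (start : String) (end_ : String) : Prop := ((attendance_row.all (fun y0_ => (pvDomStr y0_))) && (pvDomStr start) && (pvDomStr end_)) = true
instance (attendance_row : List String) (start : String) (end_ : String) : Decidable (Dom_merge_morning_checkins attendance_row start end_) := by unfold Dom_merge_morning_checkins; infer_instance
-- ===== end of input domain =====

-- B replaces A's partition+min() with a sort-then-scan: the first sorted time >= start decides the earliest in-range check-in (alternative decomposition, same return value on every admitted input).


-- ===== PORT A =====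
def merge_morning_checkins (attendance_row : List String) (start : String) (end_ : String) : List String :=
  match attendance_row.take 2 with          -- name, date = attendance_row[:2]
  | [name, date] =>
    let check_times := attendance_row.drop 2   -- attendance_row[2:]
    let in_range := check_times.filter (fun t => decide (start ≤ t) && decide (t < end_))
    let others := check_times.filter (fun t => !(decide (start ≤ t) && decide (t < end_)))
    let result := [name, date]
    let result := if in_range.isEmpty then result
                  else result ++ [(PySem.List.min? in_range (fun x => x)).getD ""]
    result ++ others
  | _ => []   -- fewer than two elements: Python raises ValueError (unpacking); excluded by Pre_

-- ===== PORT B =====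
-- the for-loop of B over the sorted times: stop at the first t >= start
def mmcScan (start end_ : String) : List String → Option String
  | [] => none
  | t :: ts => if start ≤ t then (if t < end_ then some t else none) else mmcScan start end_ ts

def merge_morning_checkins_alt (attendance_row : List String) (start : String) (end_ : String) : List String :=
  match attendance_row with                 -- name, date = attendance_row[:2]; times = attendance_row[2:]
  | [] => []   -- fewer than two elements: Python raises ValueError; excluded by Pre_
  | name :: tail =>
    match tail with
    | [] => []   -- fewer than two elements: Python raises ValueError; excluded by Pre_
    | date :: check_times =>
      let earliest := mmcScan start end_ (PySem.List.sorted check_times (fun x => x) false)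
      let result := [name, date]
      let result := match earliest with
                    | some b => result ++ [b]
                    | none => result
      result ++ check_times.filter (fun t => !(decide (start ≤ t) && decide (t < end_)))

-- ===== PRECONDITION & SPEC =====
-- Pre_ excludes exactly the rows with fewer than two elements, on which A's tuple unpacking raises ValueError.
def Pre_merge_morning_checkins (attendance_row : List String) (start : String) (end_ : String) : Prop :=
  2 ≤ attendance_row.length
instance (attendance_row : List String) (start : String) (end_ : String) : Decidable (Pre_merge_morning_checkins attendance_row start end_) := by unfold Pre_merge_morning_checkins; infer_instance
def pvWitness_merge_morning_checkins : List String × String × String :=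
  (["alice", "2024-01-01", "07:12:00", "09:00:00", "06:30:00"], "06:00:00", "08:00:00")

def Spec_merge_morning_checkins (attendance_row : List String) (start : String) (end_ : String) (out : List String) : Prop := out = merge_morning_checkins_alt attendance_row start end_
instance (attendance_row : List String) (start : String) (end_ : String) (out : List String) : Decidable (Spec_merge_morning_checkins attendance_row start end_ out) := by unfold Spec_merge_morning_checkins; infer_instance

-- ===== CLAIM (what is proved, stated in full; the proofs are below) =====
def Claim_equal_merge_morning_checkins : Prop := ∀ (attendance_row : List String) (start : String) (end_ : String), Dom_merge_morning_checkins attendance_row start end_ → Pre_merge_morning_checkins attendance_row start end_ → Spec_merge_morning_checkins attendance_row start end_ (merge_morning_checkins attendance_row start end_)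

-- ===== LEMMAS AND PROOFS =====
-- If the scan over a sorted list returns none, no element is in [start, end_).
theorem mmcScan_none {start end_ : String} {s : List String}
    (hp : s.Pairwise (· ≤ ·)) (h : mmcScan start end_ s = none) :
    ∀ t ∈ s, ¬ (start ≤ t ∧ t < end_) := by
  induction s with
  | nil => intro t ht; cases ht
  | cons a ts ih =>
    rw [List.pairwise_cons] at hp
    intro t ht hrange
    by_cases ha : start ≤ a
    · simp only [mmcScan, if_pos ha] at h
      by_cases hlt : a < end_
      · rw [if_pos hlt] at h; simp at h
      · -- a ≥ end_, so every element ≥ a is ≥ end_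
        rcases List.mem_cons.mp ht with rfl | ht
        · exact hlt hrange.2
        · exact hlt (lt_of_le_of_lt (hp.1 t ht) hrange.2)
    · simp only [mmcScan, if_neg ha] at h
      rcases List.mem_cons.mp ht with rfl | ht
      · exact ha hrange.1
      · exact ih hp.2 h t ht hrange
-- If the scan returns some m, m is an in-range element and minimal among elements ≥ start.
theorem mmcScan_some {start end_ : String} {s : List String} {m : String}
    (hp : s.Pairwise (· ≤ ·)) (h : mmcScan start end_ s = some m) :
    m ∈ s ∧ start ≤ m ∧ m < end_ ∧ ∀ t ∈ s, start ≤ t → m ≤ t := by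
  induction s with
  | nil => cases h
  | cons a ts ih =>
    rw [List.pairwise_cons] at hp
    by_cases ha : start ≤ a
    · simp only [mmcScan, if_pos ha] at h
      by_cases hlt : a < end_
      · rw [if_pos hlt] at h
        cases h
        refine ⟨List.mem_cons_self, ha, hlt, ?_⟩
        intro t ht _
        rcases List.mem_cons.mp ht with rfl | ht
        · exact le_refl _
        · exact hp.1 t ht
      · rw [if_neg hlt] at h
        simp at h
    · simp only [mmcScan, if_neg ha] at h
      obtain ⟨hm, hs, hl, hmin⟩ := ih hp.2 h
      refine ⟨List.mem_cons_of_mem _ hm, hs, hl, ?_⟩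
      intro t ht hst
      rcases List.mem_cons.mp ht with rfl | ht
      · exact absurd hst ha
      · exact hmin t ht hst

-- ===== VERDICT (by name: the statement is the Claim_ definition above) =====
theorem merge_morning_checkins_spec : Claim_equal_merge_morning_checkins := by
  intro row start end_ _ hpre
  unfold Spec_merge_morning_checkins
  match row with
  | [] => simp [Pre_merge_morning_checkins] at hpre
  | [_] => simp [Pre_merge_morning_checkins] at hpre
  | name :: date :: rest =>
    simp only [merge_morning_checkins, merge_morning_checkins_alt, List.take, List.drop]
    have hperm : (PySem.List.sorted rest (fun x => x) false).Perm rest :=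
      PySem.List.sorted_perm rest (fun x => x) false
    have hpair : (PySem.List.sorted rest (fun x => x) false).Pairwise (· ≤ ·) :=
      PySem.List.sorted_pairwise rest (fun x => x)
    cases hscan : mmcScan start end_ (PySem.List.sorted rest (fun x => x) false) with
    | none =>
      have hnone := mmcScan_none hpair hscan
      have hfil : rest.filter (fun t => decide (start ≤ t) && decide (t < end_)) = [] := by
        rw [List.filter_eq_nil_iff]
        intro t ht
        have := hnone t (hperm.mem_iff.2 ht)
        simp only [Bool.and_eq_true, decide_eq_true_eq]
        tauto
      rw [hfil]; simp
    | some m =>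
      obtain ⟨hm, hsm, hlm, hmin⟩ := mmcScan_some hpair hscan
      have hmrest : m ∈ rest := hperm.mem_iff.1 hm
      have hmfil : m ∈ rest.filter (fun t => decide (start ≤ t) && decide (t < end_)) := by
        rw [List.mem_filter]; exact ⟨hmrest, by simp [hsm, hlm]⟩
      cases hf : rest.filter (fun t => decide (start ≤ t) && decide (t < end_)) with
      | nil => rw [hf] at hmfil; cases hmfil
      | cons x t =>
        have hne : ¬ (x :: t).isEmpty := by simp
        cases hmin? : PySem.List.min? (x :: t) (fun y => y) with
        | none => rw [PySem.List.min?_eq_none_iff] at hmin?; cases hmin?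
        | some w =>
          have hwmem : w ∈ x :: t := PySem.List.min?_mem hmin?
          have hwfil : w ∈ rest.filter (fun t => decide (start ≤ t) && decide (t < end_)) := hf ▸ hwmem
          rw [List.mem_filter] at hwfil
          have hws : start ≤ w := by
            have := hwfil.2; simp only [Bool.and_eq_true, decide_eq_true_eq] at this; exact this.1
          have h1 : m ≤ w := hmin w (hperm.mem_iff.2 hwfil.1) hws
          have h2 : w ≤ m := PySem.List.min?_isMin hmin? m (hf ▸ hmfil)
          have hwm : w = m := le_antisymm h2 h1
          simp [hwm]
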